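-- pv_equiv track=rewrite | github.com/schnappischnap/advent_of_code_2019 | day_10_monitoring_station.py | targets_by_direction
-- ===== SOURCE A (Python) =====
-- import math
-- from collections import defaultdict
--
-- def targets_by_direction(p, targets):
--     x1, y1 = p
--
--     s_targets = defaultdict(list)
--     for target in targets:
--         if target == p:
--             continue
--         x2, y2 = target
--         dx, dy = x2-x1, y2-y1
--         dist = math.gcd(dx, dy)
--         direction = (dx//dist, dy//dist)
--         s_targets[direction].append((dist, target))
--
--     for direction in s_targets:
--         s_targets[direction] = [t for dist, t in sorted(s_targets[direction])]
--     return s_targets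
-- ===== SOURCE B (Python) =====
-- import math
-- from collections import defaultdict
--
-- def targets_by_direction(p, targets):
--     x1, y1 = p
--
--     buckets = defaultdict(list)
--     for target in targets:
--         if target == p:
--             continue
--         x2, y2 = target
--         dx, dy = x2 - x1, y2 - y1
--         dist = math.gcd(dx, dy)
--         bucket = buckets[(dx // dist, dy // dist)]
--         item = (dist, target)
--         for i, cur in enumerate(bucket):
--             if item < cur:
--                 bucket.insert(i, item)
--                 break
--         else:
--             bucket.append(item)
--     return defaultdict(list, {d: [t for _, t in b] for d, b in buckets.items()})
-- ===== Notes on version B (the rewrite author's own statement) =====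
-- stated objective: alternative
-- what changed: B keeps each direction bucket sorted as it goes (linear sorted insertion on arrival) instead of A's append-everything-then-sort-every-bucket second pass, and strips distances in a single dict comprehension.
import Mathlib
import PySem

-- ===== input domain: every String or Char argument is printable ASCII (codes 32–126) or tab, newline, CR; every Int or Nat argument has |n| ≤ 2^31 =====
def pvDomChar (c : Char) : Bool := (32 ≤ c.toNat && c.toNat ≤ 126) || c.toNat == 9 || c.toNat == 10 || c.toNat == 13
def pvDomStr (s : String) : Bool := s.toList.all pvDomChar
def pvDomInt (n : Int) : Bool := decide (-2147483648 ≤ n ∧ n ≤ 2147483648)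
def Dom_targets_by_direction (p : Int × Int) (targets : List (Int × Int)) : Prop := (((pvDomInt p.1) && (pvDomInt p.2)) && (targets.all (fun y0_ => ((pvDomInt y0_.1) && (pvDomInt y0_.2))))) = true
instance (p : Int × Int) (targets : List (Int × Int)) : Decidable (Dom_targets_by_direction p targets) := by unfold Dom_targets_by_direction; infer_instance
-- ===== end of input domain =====

-- B replaces A's append-then-sort-each-bucket pass by keeping every bucket sorted online
-- (linear sorted insertion), so no sorting pass over the finished dict is needed (objective: alternative).

-- Python's lexicographic order on the tuples (dist, (x, y)) sorted by A; exact: math.gcd / tuple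
-- comparison have no float or hash component.
def pvEnc (e : Int × Int × Int) : Lex (Int × Lex (Int × Int)) := toLex (e.1, toLex (e.2.1, e.2.2))

-- ===== PORT A =====
-- `sorted(bucket)` on tuples = PySem.List.sorted with the injective lexicographic key pvEnc (exact:
-- ties under pvEnc are identical elements, so stability coincides with Python's).
def targets_by_direction (p : Int × Int) (targets : List (Int × Int)) : List (Int × Int × List (Int × Int)) :=
  let s_targets : PySem.Dict (Int × Int) (List (Int × Int × Int)) :=
    targets.foldl (fun d target =>
      if target = p then d
      else
        let dx := target.1 - p.1
        let dy := target.2 - p.2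
        let dist : Int := (Int.gcd dx dy : Int)   -- math.gcd, exact on Int
        d.modify (PySem.Int.floordiv dx dist, PySem.Int.floordiv dy dist) []
          (fun b => b ++ [(dist, target)]))
      PySem.Dict.empty
  -- `for direction in s_targets: s_targets[direction] = [t for dist, t in sorted(...)]`:
  -- the reassigned values have a different type, so the rebinding loop is ported as a fold
  -- rebuilding the dict over the same keys in the same order.
  (s_targets.items.foldl (fun acc kv =>
      acc.insert kv.1 ((PySem.List.sorted kv.2 pvEnc false).map (fun e => e.2)))
    (PySem.Dict.empty : PySem.Dict (Int × Int) (List (Int × Int)))).items.map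
    (fun kv => (kv.1.1, kv.1.2, kv.2))

-- ===== PORT B =====
-- Python `item < cur` on (dist, (x, y)) tuples, exact lexicographic comparison.
def pvLt (a b : Int × Int × Int) : Bool :=
  a.1 < b.1 || (a.1 == b.1 && (a.2.1 < b.2.1 || (a.2.1 == b.2.1 && a.2.2 < b.2.2)))

-- Source B's `for i, cur in enumerate(bucket): if item < cur: insert; break / else: append`.
def pvInsort (x : Int × Int × Int) : List (Int × Int × Int) → List (Int × Int × Int)
  | [] => [x]
  | c :: t => if pvLt x c then x :: c :: t else c :: pvInsort x t

def targets_by_direction_alt (p : Int × Int) (targets : List (Int × Int)) : List (Int × Int × List (Int × Int)) :=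
  let buckets : PySem.Dict (Int × Int) (List (Int × Int × Int)) :=
    targets.foldl (fun d target =>
      if target = p then d
      else
        let dx := target.1 - p.1
        let dy := target.2 - p.2
        let dist : Int := (Int.gcd dx dy : Int)
        d.modify (PySem.Int.floordiv dx dist, PySem.Int.floordiv dy dist) []
          (fun b => pvInsort (dist, target) b))
      PySem.Dict.empty
  -- `defaultdict(list, {d: [t for _, t in b] for d, b in buckets.items()})`
  buckets.items.map (fun kv => (kv.1.1, kv.1.2, kv.2.map (fun e => e.2)))

-- ===== PRECONDITION & SPEC =====
def Spec_targets_by_direction (p : Int × Int) (targets : List (Int × Int)) (out : List (Int × Int × List (Int × Int))) : Prop := out = targets_by_direction_alt p targets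
instance (p : Int × Int) (targets : List (Int × Int)) (out : List (Int × Int × List (Int × Int))) : Decidable (Spec_targets_by_direction p targets out) := by unfold Spec_targets_by_direction; infer_instance

-- ===== CLAIM (what is proved, stated in full; the proofs are below) =====
def Claim_equal_targets_by_direction : Prop := ∀ (p : Int × Int) (targets : List (Int × Int)), Dom_targets_by_direction p targets → Spec_targets_by_direction p targets (targets_by_direction p targets)

-- ===== LEMMAS AND PROOFS =====

theorem pvLt_eq (a b : Int × Int × Int) : pvLt a b = decide (pvEnc a < pvEnc b) := by
  simp only [pvLt, pvEnc, Prod.Lex.toLex_lt_toLex]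
  by_cases h1 : a.1 < b.1 <;> by_cases h2 : a.1 = b.1 <;>
    by_cases h3 : a.2.1 < b.2.1 <;> by_cases h4 : a.2.1 = b.2.1 <;>
      simp [h1, h2, h3, h4]

theorem pvInsort_eq_insertBy (x : Int × Int × Int) (l : List (Int × Int × Int)) :
    pvInsort x l = PySem.List.insertBy (fun a b => decide (pvEnc a < pvEnc b)) x l := by
  induction l with
  | nil => rfl
  | cons c t ih => simp only [pvInsort, PySem.List.insertBy, pvLt_eq, ih]

-- inserting one element into an already-sorted bucket = sorting the appended bucket
theorem pvInsort_sorted (v : List (Int × Int × Int)) (x : Int × Int × Int) :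
    pvInsort x (PySem.List.sorted v pvEnc false) = PySem.List.sorted (v ++ [x]) pvEnc false := by
  rw [PySem.List.sorted_eq_foldl_insertBy, PySem.List.sorted_eq_foldl_insertBy,
    List.foldl_append, pvInsort_eq_insertBy]
  rfl

-- the dict-level invariant: B's dict is A's dict with every bucket sorted
theorem pv_contains_rel (d1 d2 : PySem.Dict (Int × Int) (List (Int × Int × Int)))
    (h : d2.items = d1.items.map (fun kv => (kv.1, PySem.List.sorted kv.2 pvEnc false)))
    (k : Int × Int) : d2.contains k = d1.contains k := by
  simp only [PySem.Dict.contains, h, List.any_map]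
  rfl

theorem pv_getD_rel (d1 d2 : PySem.Dict (Int × Int) (List (Int × Int × Int)))
    (h : d2.items = d1.items.map (fun kv => (kv.1, PySem.List.sorted kv.2 pvEnc false)))
    (k : Int × Int) : d2.getD k [] = PySem.List.sorted (d1.getD k []) pvEnc false := by
  simp only [PySem.Dict.getD, PySem.Dict.get?, h, List.find?_map]
  cases hf : List.find? (fun p => p.1 == k) d1.items with
  | none =>
      have : (List.find? ((fun p => p.1 == k) ∘ fun kv => (kv.1, PySem.List.sorted kv.2 pvEnc false)) d1.items) = none := by
        simpa [Function.comp] using hf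
      simp [this]
      rfl
  | some kv =>
      have : (List.find? ((fun p => p.1 == k) ∘ fun kv => (kv.1, PySem.List.sorted kv.2 pvEnc false)) d1.items) = some kv := by
        simpa [Function.comp] using hf
      simp [this]

theorem pv_modify_rel (d1 d2 : PySem.Dict (Int × Int) (List (Int × Int × Int)))
    (h : d2.items = d1.items.map (fun kv => (kv.1, PySem.List.sorted kv.2 pvEnc false)))
    (k : Int × Int) (e : Int × Int × Int) :
    (d2.modify k [] (fun b => pvInsort e b)).items
      = (d1.modify k [] (fun b => b ++ [e])).items.map
          (fun kv => (kv.1, PySem.List.sorted kv.2 pvEnc false)) := by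
  have hv : pvInsort e (d2.getD k []) = PySem.List.sorted (d1.getD k [] ++ [e]) pvEnc false := by
    rw [pv_getD_rel d1 d2 h k, pvInsort_sorted]
  simp only [PySem.Dict.modify, PySem.Dict.insert, pv_contains_rel d1 d2 h k]
  by_cases hc : d1.contains k
  · simp only [hc, if_true, h, List.map_map]
    refine List.map_congr_left (fun kv _ => ?_)
    by_cases hk : kv.1 = k <;> simp [hk, hv]
  · simp [hc, h, hv]

theorem pv_fold_rel (p : Int × Int) (l : List (Int × Int))
    (d1 d2 : PySem.Dict (Int × Int) (List (Int × Int × Int)))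
    (h : d2.items = d1.items.map (fun kv => (kv.1, PySem.List.sorted kv.2 pvEnc false))) :
    (l.foldl (fun d target =>
      if target = p then d
      else
        let dx := target.1 - p.1
        let dy := target.2 - p.2
        let dist : Int := (Int.gcd dx dy : Int)
        d.modify (PySem.Int.floordiv dx dist, PySem.Int.floordiv dy dist) []
          (fun b => pvInsort (dist, target) b)) d2).items
    = (l.foldl (fun d target =>
      if target = p then d
      else
        let dx := target.1 - p.1
        let dy := target.2 - p.2
        let dist : Int := (Int.gcd dx dy : Int)
        d.modify (PySem.Int.floordiv dx dist, PySem.Int.floordiv dy dist) []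
          (fun b => b ++ [(dist, target)])) d1).items.map
        (fun kv => (kv.1, PySem.List.sorted kv.2 pvEnc false)) := by
  induction l generalizing d1 d2 with
  | nil => simpa using h
  | cons t rest ih =>
      by_cases ht : t = p
      · simp only [List.foldl_cons, ht]
        exact ih d1 d2 h
      · simp only [List.foldl_cons, if_neg ht]
        exact ih _ _ (pv_modify_rel d1 d2 h _ _)

-- A's builder fold, with the `continue` turned into a filter so the key-nodup lemma applies
theorem pv_foldA_filter (p : Int × Int) (targets : List (Int × Int)) :
    (targets.foldl (fun d target =>
      if target = p then d
      else
        let dx := target.1 - p.1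
        let dy := target.2 - p.2
        let dist : Int := (Int.gcd dx dy : Int)
        d.modify (PySem.Int.floordiv dx dist, PySem.Int.floordiv dy dist) []
          (fun b => b ++ [(dist, target)])) PySem.Dict.empty)
    = ((targets.filter (fun t => decide (¬ t = p))).foldl (fun d target =>
        let dx := target.1 - p.1
        let dy := target.2 - p.2
        let dist : Int := (Int.gcd dx dy : Int)
        d.modify (PySem.Int.floordiv dx dist, PySem.Int.floordiv dy dist) []
          (fun b => b ++ [(dist, target)])) PySem.Dict.empty) := by
  have hfun : (fun (d : PySem.Dict (Int × Int) (List (Int × Int × Int))) (target : Int × Int) =>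
      if target = p then d
      else
        let dx := target.1 - p.1
        let dy := target.2 - p.2
        let dist : Int := (Int.gcd dx dy : Int)
        d.modify (PySem.Int.floordiv dx dist, PySem.Int.floordiv dy dist) []
          (fun b => b ++ [(dist, target)]))
    = (fun d target =>
      if ¬ target = p then
        (let dx := target.1 - p.1
         let dy := target.2 - p.2
         let dist : Int := (Int.gcd dx dy : Int)
         d.modify (PySem.Int.floordiv dx dist, PySem.Int.floordiv dy dist) []
          (fun b => b ++ [(dist, target)]))
      else d) := by
    funext d target
    by_cases ht : target = p <;> simp [ht]
  rw [hfun, PySem.List.foldl_ite_eq_foldl_filter (fun t => ¬ t = p)]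

theorem pv_keysA_nodup (p : Int × Int) (targets : List (Int × Int)) :
    ((targets.foldl (fun d target =>
      if target = p then d
      else
        let dx := target.1 - p.1
        let dy := target.2 - p.2
        let dist : Int := (Int.gcd dx dy : Int)
        d.modify (PySem.Int.floordiv dx dist, PySem.Int.floordiv dy dist) []
          (fun b => b ++ [(dist, target)])) PySem.Dict.empty)).items.map (fun kv => kv.1) |>.Nodup := by
  show ((targets.foldl _ PySem.Dict.empty : PySem.Dict (Int × Int) (List (Int × Int × Int)))).keys.Nodup
  rw [pv_foldA_filter]
  exact PySem.Dict.nodup_keys_foldl_modify_key _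
    (fun (target : Int × Int) => (PySem.Int.floordiv (target.1 - p.1) ((Int.gcd (target.1 - p.1) (target.2 - p.2) : Int)),
      PySem.Int.floordiv (target.2 - p.2) ((Int.gcd (target.1 - p.1) (target.2 - p.2) : Int))))
    [] (fun _ (target : Int × Int) b => b ++ [((Int.gcd (target.1 - p.1) (target.2 - p.2) : Int), target)]) _
    PySem.Dict.nodup_keys_empty

-- assembling A's second pass over a dict with Nodup keys
theorem pv_final (L : List ((Int × Int) × List (Int × Int × Int)))
    (hnd : (L.map (fun kv => kv.1)).Nodup) :
    (L.foldl (fun acc kv =>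
        acc.insert kv.1 ((PySem.List.sorted kv.2 pvEnc false).map (fun e => e.2)))
      (PySem.Dict.empty : PySem.Dict (Int × Int) (List (Int × Int)))).items.map
        (fun kv => (kv.1.1, kv.1.2, kv.2))
    = (L.map (fun kv => (kv.1, PySem.List.sorted kv.2 pvEnc false))).map
        (fun kv => (kv.1.1, kv.1.2, kv.2.map (fun e => e.2))) := by
  rw [PySem.Dict.items_foldl_insert_fresh L (fun kv => kv.1)
    (fun kv => (PySem.List.sorted kv.2 pvEnc false).map (fun e => e.2)) PySem.Dict.empty
    (fun a _ => PySem.Dict.contains_empty a.1) hnd]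
  simp [PySem.Dict.empty, List.map_map, Function.comp_def]

-- ===== VERDICT (by name: the statement is the Claim_ definition above) =====
theorem targets_by_direction_spec : Claim_equal_targets_by_direction := by
  intro p targets _
  simp only [Spec_targets_by_direction, targets_by_direction, targets_by_direction_alt]
  rw [pv_fold_rel p targets PySem.Dict.empty PySem.Dict.empty rfl]
  exact pv_final _ (pv_keysA_nodup p targets)
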